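-- pv_equiv track=rewrite | github.com/GabrielF4/Codewars-challenges | Dreidel_dreidel.py | gamble
-- ===== SOURCE A (Python) =====
-- def gamble(rolls, my_coins, pot):
--
--     for roll in rolls:
--         if roll == 'Gimel':
--             my_coins += pot
--             pot = 0
--         elif roll == 'Hei':
--             my_coins += pot//2
--             pot -= pot//2
--         elif roll == 'Shin':
--             pot += 1
--             my_coins -= 1
--
--     return my_coins
-- ===== SOURCE B (Python) =====
-- def gamble(rolls, my_coins, pot):
--     # Only the suffix after the LAST 'Gimel' matters for the final pot
--     # (Gimel resets it to 0), and coins+pot is conserved by every roll.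
--     try:
--         cut = len(rolls) - 1 - rolls[::-1].index('Gimel')
--         tail, p = rolls[cut + 1:], 0
--     except ValueError:
--         tail, p = rolls, pot
--     for r in tail:          # no 'Gimel' in tail
--         if r == 'Hei':
--             p = (p + 1) // 2    # p - p//2 == ceil(p/2)
--         elif r == 'Shin':
--             p += 1
--     return my_coins + pot - p
-- ===== Notes on version B (the rewrite author's own statement) =====
-- stated objective: alternative
-- what changed: B reverse-searches for the last 'Gimel' (which resets the pot), settles only the Gimel-free suffix with a two-branch ceil-halving loop ((p+1)//2 instead of p -= p//2), and returns my_coins + pot - final_pot via the conservation invariant, never updating coins per step and never visiting the prefix's effects.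
import Mathlib
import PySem

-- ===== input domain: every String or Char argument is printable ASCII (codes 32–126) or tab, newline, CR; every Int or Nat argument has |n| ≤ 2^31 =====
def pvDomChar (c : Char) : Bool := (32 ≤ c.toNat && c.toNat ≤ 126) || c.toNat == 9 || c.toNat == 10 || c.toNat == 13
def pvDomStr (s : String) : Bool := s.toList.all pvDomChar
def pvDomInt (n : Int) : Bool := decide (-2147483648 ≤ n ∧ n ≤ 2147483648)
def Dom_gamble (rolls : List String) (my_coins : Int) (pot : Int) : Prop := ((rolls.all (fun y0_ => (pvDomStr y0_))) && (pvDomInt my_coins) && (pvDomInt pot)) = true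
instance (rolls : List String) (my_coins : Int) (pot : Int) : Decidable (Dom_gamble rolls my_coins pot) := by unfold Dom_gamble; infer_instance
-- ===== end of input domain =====

-- B skips everything before the last 'Gimel' (which resets the pot), settles only the
-- Gimel-free suffix with ceil-halving, and returns coins+pot minus the final pot (simpler/alternative).

-- ===== PORT A =====
-- A: single pass over rolls carrying (my_coins, pot); each branch updates both; return my_coins.
def stepA (st : Int × Int) (roll : String) : Int × Int :=
  let my_coins := st.1
  let pot := st.2
  if roll = "Gimel" then (my_coins + pot, 0)
  else if roll = "Hei" then (my_coins + PySem.Int.floordiv pot 2, pot - PySem.Int.floordiv pot 2)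
  else if roll = "Shin" then (my_coins - 1, pot + 1)
  else (my_coins, pot)

def gamble (rolls : List String) (my_coins : Int) (pot : Int) : Int :=
  (rolls.foldl stepA (my_coins, pot)).1

-- ===== PORT B =====
-- Source B's settle loop over the Gimel-free tail: only Hei/Shin branches, Hei is (p+1)//2.
def settleStep (p : Int) (r : String) : Int :=
  if r = "Hei" then PySem.Int.floordiv (p + 1) 2
  else if r = "Shin" then p + 1
  else p

-- Source B: rolls[::-1].index('Gimel') → index? of the reverse (raising branch = the none case);
-- cut = len-1-j; tail = rolls[cut+1:] via PySem.List.slice; return my_coins + pot - p.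
def gamble_alt (rolls : List String) (my_coins : Int) (pot : Int) : Int :=
  let init : List String × Int :=
    match PySem.List.index? rolls.reverse "Gimel" with
    | some j =>
        let cut : Int := (rolls.length : Int) - 1 - (j : Int)
        (PySem.List.slice rolls (some (cut + 1)) none, 0)
    | none => (rolls, pot)
  my_coins + pot - init.1.foldl settleStep init.2

-- ===== PRECONDITION & SPEC =====
def Spec_gamble (rolls : List String) (my_coins : Int) (pot : Int) (out : Int) : Prop := out = gamble_alt rolls my_coins pot
instance (rolls : List String) (my_coins : Int) (pot : Int) (out : Int) : Decidable (Spec_gamble rolls my_coins pot out) := by unfold Spec_gamble; infer_instance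

-- ===== CLAIM (what is proved, stated in full; the proofs are below) =====
def Claim_equal_gamble : Prop := ∀ (rolls : List String) (my_coins : Int) (pot : Int), Dom_gamble rolls my_coins pot → Spec_gamble rolls my_coins pot (gamble rolls my_coins pot)

-- ===== LEMMAS AND PROOFS =====

-- the pot-only evolution A's fold induces (proof device, not part of either port)
def stepB (pot : Int) (roll : String) : Int :=
  if roll = "Gimel" then 0
  else if roll = "Hei" then pot - PySem.Int.floordiv pot 2
  else if roll = "Shin" then pot + 1
  else pot

-- A's fold state is exactly (coins+pot - potEvolution, potEvolution).
theorem gamble_fold_invariant (rolls : List String) (m p : Int) :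
    rolls.foldl stepA (m, p) = (m + p - rolls.foldl stepB p, rolls.foldl stepB p) := by
  induction rolls generalizing m p with
  | nil => simp
  | cons r rs ih =>
    simp only [List.foldl_cons]
    have hstep : stepA (m, p) r = ((m + p) - stepB p r, stepB p r) := by
      unfold stepA stepB; split_ifs <;> simp <;> ring
    rw [hstep, ih]
    simp only [Prod.mk.injEq]
    exact ⟨by ring, trivial⟩

-- p - p//2 = (p+1)//2 for all ints
theorem halve_eq (p : Int) :
    p - PySem.Int.floordiv p 2 = PySem.Int.floordiv (p + 1) 2 := by
  rw [PySem.Int.floordiv_eq_ediv_of_pos (by omega), PySem.Int.floordiv_eq_ediv_of_pos (by omega)]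
  omega

-- on a Gimel-free list, the pot evolution is B's settle loop
theorem foldl_stepB_eq_settle (ys : List String) (p : Int) (h : "Gimel" ∉ ys) :
    ys.foldl stepB p = ys.foldl settleStep p := by
  induction ys generalizing p with
  | nil => rfl
  | cons r rs ih =>
    simp only [List.mem_cons, not_or] at h
    simp only [List.foldl_cons]
    have hone : stepB p r = settleStep p r := by
      unfold stepB settleStep
      rw [if_neg (fun e => h.1 e.symm)]
      split_ifs
      · exact halve_eq p
      · rfl
      · rfl
    rw [hone]
    exact ih _ h.2

-- a Gimel resets the evolution: only the part after the last Gimel matters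
theorem foldl_stepB_append (xs ys : List String) (p : Int) :
    (xs ++ "Gimel" :: ys).foldl stepB p = ys.foldl stepB 0 := by
  rw [List.foldl_append]
  simp only [List.foldl_cons]
  have : stepB (xs.foldl stepB p) "Gimel" = 0 := by unfold stepB; simp
  rw [this]

-- ===== VERDICT (by name: the statement is the Claim_ definition above) =====
theorem gamble_spec : Claim_equal_gamble := by
  intro rolls m p _
  unfold Spec_gamble gamble gamble_alt
  rw [gamble_fold_invariant]
  cases hidx : PySem.List.index? rolls.reverse "Gimel" with
  | none =>
    have hnot : "Gimel" ∉ rolls := by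
      have := (PySem.List.index?_eq_none_iff (xs := rolls.reverse) (v := "Gimel")).mp hidx
      simpa using this
    rw [foldl_stepB_eq_settle _ _ hnot]
  | some j =>
    obtain ⟨pre, suf, hrev, hlen, hnotpre⟩ :=
      (PySem.List.index?_eq_some_iff (xs := rolls.reverse) (v := "Gimel") (k := j)).mp hidx
    have hrolls : rolls = suf.reverse ++ "Gimel" :: pre.reverse := by
      have := congrArg List.reverse hrev
      simpa using this
    have hnottail : "Gimel" ∉ pre.reverse := by simpa using hnotpre
    have hlenrolls : rolls.length = suf.length + 1 + j := by
      have hlr : rolls.reverse.length = (pre ++ "Gimel" :: suf).length := by rw [hrev]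
      simp [hlen] at hlr
      omega
    have hslice :
        PySem.List.slice rolls (some ((rolls.length : Int) - 1 - (j : Int) + 1)) none
          = pre.reverse := by
      have hcast : ((rolls.length : Int) - 1 - (j : Int) + 1) = ((suf.length + 1 : Nat) : Int) := by
        omega
      rw [hcast, PySem.List.slice_from_natCast, hrolls]
      have hsplit : suf.reverse ++ "Gimel" :: pre.reverse
          = (suf.reverse ++ ["Gimel"]) ++ pre.reverse := by simp
      have hl : suf.length + 1 = (suf.reverse ++ ["Gimel"]).length := by simp
      rw [hsplit, hl]
      exact List.drop_left
    dsimp only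
    rw [hslice]
    rw [hrolls, foldl_stepB_append, foldl_stepB_eq_settle _ _ hnottail]
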